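-- pv_equiv track=rewrite | github.com/ElefHead/Reversi | reversi.py | moveVerticalUpwards
-- ===== SOURCE A (Python) =====
-- def moveVerticalUpwards(board, position, tile):
-- 	opponent_tile = 1 if tile == 2 else 2
-- 	for i in range(position[0]-1,-1,-1):
-- 		if board[i][position[1]] == opponent_tile:
-- 			board[i][position[1]] = tile
-- 		else:
-- 			break
-- 	return board
-- ===== SOURCE B (Python) =====
-- def moveVerticalUpwards(board, position, tile):
--     opponent_tile = 1 if tile == 2 else 2
--     row0, col = position[0], position[1]
--     # phase 1: count the run of opponent tiles directly above the placed tile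
--     k = 0
--     while k < row0 and board[row0 - 1 - k][col] == opponent_tile:
--         k += 1
--     # phase 2: overwrite that contiguous block of rows in one ascending sweep
--     for r in range(row0 - k, row0):
--         board[r][col] = tile
--     return board
-- ===== Notes on version B (the rewrite author's own statement) =====
-- stated objective: alternative
-- what changed: A interleaves reading and flipping in one downward loop with break; B first counts the run of opponent tiles above the placed tile (pure scan, no writes), then overwrites that contiguous block of rows in a separate ascending sweep.
import Mathlib
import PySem

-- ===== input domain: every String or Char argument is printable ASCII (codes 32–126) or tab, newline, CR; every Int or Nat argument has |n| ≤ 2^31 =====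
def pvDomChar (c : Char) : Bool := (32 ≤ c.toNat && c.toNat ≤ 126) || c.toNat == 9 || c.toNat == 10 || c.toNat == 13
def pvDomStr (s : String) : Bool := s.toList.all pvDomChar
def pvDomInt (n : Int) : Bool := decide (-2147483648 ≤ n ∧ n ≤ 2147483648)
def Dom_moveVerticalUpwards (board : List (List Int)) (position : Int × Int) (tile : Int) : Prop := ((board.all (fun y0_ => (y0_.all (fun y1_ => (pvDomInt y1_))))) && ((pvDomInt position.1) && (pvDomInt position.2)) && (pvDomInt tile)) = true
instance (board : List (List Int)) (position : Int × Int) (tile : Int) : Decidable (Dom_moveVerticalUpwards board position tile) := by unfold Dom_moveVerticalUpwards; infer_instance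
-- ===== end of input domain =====

-- B re-implements A's interleaved flip loop as a two-phase count-the-run-then-overwrite-the-block
-- sweep ('alternative' decomposition, same cost). A mutates `board` in place and B performs the same
-- in-place mutation in Python; the equivalence proved here is about the RETURN value.

-- ===== PORT A =====
-- A's for-loop over range(position[0]-1, -1, -1) with break, reading and writing the board as it goes.
def mvLoopA (col tile opp : Int) : List Int → List (List Int) → List (List Int)
  | [], b => b
  | i :: rest, b =>
    if PySem.List.pyGetD (PySem.List.pyGetD b i []) col 0 = opp then
      mvLoopA col tile opp rest
        (PySem.List.pySetD b i (PySem.List.pySetD (PySem.List.pyGetD b i []) col tile))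
    else b

def moveVerticalUpwards (board : List (List Int)) (position : Int × Int) (tile : Int) : List (List Int) :=
  let opponent_tile : Int := if tile = 2 then 1 else 2
  mvLoopA position.2 tile opponent_tile (PySem.List.pyRange (position.1 - 1) (-1) (-1)) board

-- ===== PORT B =====
-- phase 1 of Source B: the while-loop counting the run of opponent tiles above the placed tile
-- (fuel `row0.toNat` bounds the loop exactly: the guard k < row0 admits at most that many steps).
def mvCount (board : List (List Int)) (col opp row0 : Int) : Nat → Nat → Nat
  | k, 0 => k
  | k, fuel+1 =>
    if (k : Int) < row0 ∧
        PySem.List.pyGetD (PySem.List.pyGetD board (row0 - 1 - (k : Int)) []) col 0 = opp then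
      mvCount board col opp row0 (k+1) fuel
    else k

-- phase 2 of Source B: for r in range(row0-k, row0): board[r][col] = tile
def mvApply (col tile : Int) : List Int → List (List Int) → List (List Int)
  | [], b => b
  | r :: rest, b =>
    mvApply col tile rest
      (PySem.List.pySetD b r (PySem.List.pySetD (PySem.List.pyGetD b r []) col tile))

def moveVerticalUpwards_alt (board : List (List Int)) (position : Int × Int) (tile : Int) : List (List Int) :=
  let opponent_tile : Int := if tile = 2 then 1 else 2
  let row0 := position.1
  let col := position.2
  let k := mvCount board col opponent_tile row0 0 row0.toNat
  mvApply col tile (PySem.List.pyRange (row0 - (k : Int)) row0 1) board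

-- ===== PRECONDITION & SPEC =====
-- cell (i, col) of the board is a valid Python access (col may be a negative wrapped index)
def pvCellOK (b : List (List Int)) (i : Nat) (col : Int) : Prop :=
  i < b.length ∧ -(((b.getD i []).length : Int)) ≤ col ∧ col < ((b.getD i []).length : Int)

-- Pre_ excludes exactly the inputs on which A raises IndexError: those where the downward scan,
-- after seeing only valid opponent cells at every row strictly above some row i < position[0],
-- goes on to access row i at a cell that is out of range.  It admits every input A returns on.
def Pre_moveVerticalUpwards (board : List (List Int)) (position : Int × Int) (tile : Int) : Prop :=
  0 < position.1 →
    position.1 ≤ (board.length : Int) ∧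
    ∀ i ∈ List.range position.1.toNat,
      (∀ j ∈ List.range position.1.toNat, i < j →
          pvCellOK board j position.2 ∧
          PySem.List.pyGetD (PySem.List.pyGetD board (j : Int) []) position.2 0
            = (if tile = 2 then 1 else 2)) →
      pvCellOK board i position.2
instance (board : List (List Int)) (position : Int × Int) (tile : Int) : Decidable (Pre_moveVerticalUpwards board position tile) := by unfold Pre_moveVerticalUpwards pvCellOK; infer_instance

def pvWitness_moveVerticalUpwards : List (List Int) × (Int × Int) × Int :=
  ([[1, 1], [1, 2]], ((2 : Int), (0 : Int)), (2 : Int))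

def Spec_moveVerticalUpwards (board : List (List Int)) (position : Int × Int) (tile : Int) (out : List (List Int)) : Prop := out = moveVerticalUpwards_alt board position tile
instance (board : List (List Int)) (position : Int × Int) (tile : Int) (out : List (List Int)) : Decidable (Spec_moveVerticalUpwards board position tile out) := by unfold Spec_moveVerticalUpwards; infer_instance

-- ===== CLAIM (what is proved, stated in full; the proofs are below) =====
def Claim_equal_moveVerticalUpwards : Prop := ∀ (board : List (List Int)) (position : Int × Int) (tile : Int), Dom_moveVerticalUpwards board position tile → Pre_moveVerticalUpwards board position tile → Spec_moveVerticalUpwards board position tile (moveVerticalUpwards board position tile)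

-- ===== LEMMAS AND PROOFS =====

-- mvCnt b col opp m = length of the run of opponent cells at rows m-1, m-2, … (a clean recursive
-- characterisation of B's counting phase, peeling from the top row).
def mvCnt (b : List (List Int)) (col opp : Int) : Nat → Nat
  | 0 => 0
  | m+1 =>
    if PySem.List.pyGetD (PySem.List.pyGetD b (m : Int) []) col 0 = opp then
      mvCnt b col opp m + 1
    else 0

lemma mvCnt_le (b : List (List Int)) (col opp : Int) (m : Nat) : mvCnt b col opp m ≤ m := by
  induction m with
  | zero => simp [mvCnt]
  | succ m ih => simp only [mvCnt]; split_ifs <;> omega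

lemma mvCount_eq_cnt (b : List (List Int)) (col opp : Int) (n : Nat) :
    ∀ fuel k, n - k ≤ fuel → mvCount b col opp (n : Int) k fuel = k + mvCnt b col opp (n - k) := by
  intro fuel
  induction fuel with
  | zero =>
    intro k hk
    have : n - k = 0 := by omega
    simp [mvCount, this, mvCnt]
  | succ fuel ih =>
    intro k hk
    by_cases hkn : k < n
    · have hm : n - k = (n - (k+1)) + 1 := by omega
      have hidx : ((n - (k+1) : Nat) : Int) = (n : Int) - 1 - (k : Int) := by omega
      simp only [mvCount, hm, mvCnt, hidx]
      by_cases hc : PySem.List.pyGetD (PySem.List.pyGetD b ((n : Int) - 1 - (k : Int)) []) col 0 = opp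
      · have hlt : (k : Int) < (n : Int) := by exact_mod_cast hkn
        rw [if_pos ⟨hlt, hc⟩, if_pos hc, ih (k+1) (by omega)]
        omega
      · rw [if_neg (by tauto), if_neg hc]; omega
    · have h0 : n - k = 0 := by omega
      have hlt : ¬ ((k : Int) < (n : Int)) := by exact_mod_cast hkn
      simp [mvCount, h0, mvCnt, hlt]

-- read-over-write for distinct nonnegative row indices
lemma pyGetD_pySetD_ne (b : List (List Int)) (i j : Int) (v : List Int) (d : List Int)
    (hi : 0 ≤ i) (hj : 0 ≤ j) (hne : i ≠ j) :
    PySem.List.pyGetD (PySem.List.pySetD b i v) j d = PySem.List.pyGetD b j d := by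
  rw [PySem.List.pySetD_of_nonneg _ _ hi, PySem.List.pyGetD_of_nonneg _ _ hj,
    PySem.List.pyGetD_of_nonneg _ _ hj]
  have hne' : i.toNat ≠ j.toNat := by omega
  simp only [List.getD]
  rw [List.getElem?_set_ne hne']

-- writes to distinct nonnegative rows commute
lemma pySetD_pySetD_comm (b : List (List Int)) (i j : Int) (v w : List Int)
    (hi : 0 ≤ i) (hj : 0 ≤ j) (hne : i ≠ j) :
    PySem.List.pySetD (PySem.List.pySetD b i v) j w
      = PySem.List.pySetD (PySem.List.pySetD b j w) i v := by
  have hne' : i.toNat ≠ j.toNat := by omega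
  rw [PySem.List.pySetD_of_nonneg _ _ hi, PySem.List.pySetD_of_nonneg _ _ hj,
    PySem.List.pySetD_of_nonneg _ _ hj, PySem.List.pySetD_of_nonneg _ _ hi]
  exact List.set_comm _ _ hne'

-- B's apply phase never looks at a row outside its index list
lemma mvApply_pyGetD (col tile : Int) :
    ∀ (idxs : List Int) (b : List (List Int)) (m : Int), 0 ≤ m →
      (∀ j ∈ idxs, 0 ≤ j ∧ j ≠ m) →
      PySem.List.pyGetD (mvApply col tile idxs b) m [] = PySem.List.pyGetD b m [] := by
  intro idxs
  induction idxs with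
  | nil => intro b m _ _; rfl
  | cons j rest ih =>
    intro b m hm h
    obtain ⟨hj, hjm⟩ := h j (by simp)
    simp only [mvApply]
    rw [ih _ m hm (fun x hx => h x (by simp [hx])),
      pyGetD_pySetD_ne _ _ _ _ _ hj hm (fun e => hjm e)]

-- a write to a row outside the index list commutes with the whole apply phase
lemma mvApply_pySetD (col tile : Int) :
    ∀ (idxs : List Int) (b : List (List Int)) (m : Int) (v : List Int), 0 ≤ m →
      (∀ j ∈ idxs, 0 ≤ j ∧ j ≠ m) →
      mvApply col tile idxs (PySem.List.pySetD b m v)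
        = PySem.List.pySetD (mvApply col tile idxs b) m v := by
  intro idxs
  induction idxs with
  | nil => intro b m v _ _; rfl
  | cons j rest ih =>
    intro b m v hm h
    obtain ⟨hj, hjm⟩ := h j (by simp)
    simp only [mvApply]
    rw [pyGetD_pySetD_ne _ _ _ _ _ hm hj (fun e => hjm e.symm),
      pySetD_pySetD_comm _ _ _ _ _ hm hj (fun e => hjm e.symm),
      ih _ m v hm (fun x hx => h x (by simp [hx]))]

lemma mvApply_append (col tile : Int) :
    ∀ (xs ys : List Int) (b : List (List Int)),
      mvApply col tile (xs ++ ys) b = mvApply col tile ys (mvApply col tile xs b) := by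
  intro xs
  induction xs with
  | nil => intro ys b; rfl
  | cons x rest ih => intro ys b; simp only [List.cons_append, mvApply]; exact ih _ _

-- the counting phase only reads rows below m, so a write at row m does not change it
lemma mvCnt_pySetD_high (col opp : Int) (nI : Int) (v : List Int) :
    ∀ (m : Nat) (b : List (List Int)), (m : Int) ≤ nI → 0 ≤ nI →
      mvCnt (PySem.List.pySetD b nI v) col opp m = mvCnt b col opp m := by
  intro m
  induction m with
  | zero => intro b _ _; rfl
  | succ m ih =>
    intro b hm hn
    have hne : (m : Int) ≠ nI := by omega
    simp only [mvCnt]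
    rw [pyGetD_pySetD_ne _ _ _ _ _ hn (by positivity) (fun e => hne e.symm), ih b (by omega) hn]

-- MAIN: A's interleaved loop down from row n-1 equals B's count-then-apply, for every board
lemma loopA_eq_apply (col tile opp : Int) :
    ∀ (n : Nat) (b : List (List Int)),
      mvLoopA col tile opp (PySem.List.pyRange ((n : Int) - 1) (-1) (-1)) b
        = mvApply col tile
            (PySem.List.pyRange ((n : Int) - (mvCnt b col opp n : Int)) (n : Int) 1) b := by
  intro n
  induction n with
  | zero =>
    intro b
    rw [PySem.List.pyRange_neg_one_eq_nil (by norm_num),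
      PySem.List.pyRange_one_eq_nil (by simp [mvCnt])]
    rfl
  | succ n ih =>
    intro b
    have hcons : PySem.List.pyRange (((n : Nat) + 1 : Nat) - 1 : Int) (-1) (-1)
        = (n : Int) :: PySem.List.pyRange ((n : Int) - 1) (-1) (-1) := by
      have h1 : (((n : Nat) + 1 : Nat) : Int) - 1 = (n : Int) := by push_cast; ring
      rw [h1, PySem.List.pyRange_neg_one_cons (by omega)]
    rw [hcons]
    simp only [mvLoopA]
    by_cases hc : PySem.List.pyGetD (PySem.List.pyGetD b (n : Int) []) col 0 = opp
    · rw [if_pos hc]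
      set v := PySem.List.pySetD (PySem.List.pyGetD b (n : Int) []) col tile with hv
      set b' := PySem.List.pySetD b (n : Int) v with hb'
      have hcnt' : mvCnt b' col opp n = mvCnt b col opp n :=
        mvCnt_pySetD_high col opp (n : Int) v n b (le_refl _) (by positivity)
      have hcnt1 : mvCnt b col opp (n + 1) = mvCnt b col opp n + 1 := by
        simp only [mvCnt]; rw [if_pos hc]
      have hle : mvCnt b col opp n ≤ n := mvCnt_le b col opp n
      have hbound : ((n + 1 : Nat) : Int) - ((mvCnt b col opp (n+1) : Nat) : Int)
          = (n : Int) - (mvCnt b col opp n : Int) := by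
        rw [hcnt1]; push_cast; ring
      rw [ih b', hcnt', hbound]
      have hsplit : PySem.List.pyRange ((n : Int) - (mvCnt b col opp n : Int)) ((n+1 : Nat) : Int) 1
          = PySem.List.pyRange ((n : Int) - (mvCnt b col opp n : Int)) (n : Int) 1 ++ [(n : Int)] := by
        have h2 : ((n + 1 : Nat) : Int) = (n : Int) + 1 := by push_cast; ring
        rw [h2, PySem.List.pyRange_one_succ_right (by omega)]
      rw [hsplit, mvApply_append]
      set idxs := PySem.List.pyRange ((n : Int) - (mvCnt b col opp n : Int)) (n : Int) 1 with hidxs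
      have hmem : ∀ j ∈ idxs, 0 ≤ j ∧ j ≠ (n : Int) := by
        intro j hj
        rw [hidxs, PySem.List.mem_pyRange_one] at hj
        constructor <;> omega
      simp only [mvApply]
      rw [mvApply_pyGetD col tile idxs b (n : Int) (by positivity) hmem,
        ← mvApply_pySetD col tile idxs b (n : Int) v (by positivity) hmem]
    · rw [if_neg hc]
      have hcnt0 : mvCnt b col opp (n + 1) = 0 := by
        simp only [mvCnt]; rw [if_neg hc]
      rw [hcnt0, PySem.List.pyRange_one_eq_nil (by push_cast; omega)]
      rfl

-- the two ports agree on EVERY input (the precondition only matches the Pythons, which raise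
-- IndexError outside it)
lemma ports_eq (board : List (List Int)) (position : Int × Int) (tile : Int) :
    moveVerticalUpwards board position tile = moveVerticalUpwards_alt board position tile := by
  simp only [moveVerticalUpwards, moveVerticalUpwards_alt]
  by_cases h : position.1 ≤ 0
  · have htn : position.1.toNat = 0 := by omega
    rw [PySem.List.pyRange_neg_one_eq_nil (by omega), htn]
    simp [mvLoopA, mvCount, mvApply, PySem.List.pyRange_one_eq_nil (le_refl position.1)]
  · have hn : position.1 = (position.1.toNat : Int) := by omega
    rw [hn]
    simp only [Int.toNat_natCast]
    rw [mvCount_eq_cnt board position.2 (if tile = 2 then 1 else 2) position.1.toNat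
      position.1.toNat 0 (by omega)]
    simpa using loopA_eq_apply position.2 tile (if tile = 2 then 1 else 2) position.1.toNat board

-- ===== VERDICT (by name: the statement is the Claim_ definition above) =====
theorem moveVerticalUpwards_spec : Claim_equal_moveVerticalUpwards := by
  intro board position tile _ _
  unfold Spec_moveVerticalUpwards
  exact ports_eq board position tile
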